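-- pv_equiv track=rewrite | github.com/mrvladus/Errands | errands/lib/recurrence.py | parse_rrule_parts
-- ===== SOURCE A (Python) =====
-- def parse_rrule_parts(rrule_str: str) -> tuple[str, int]:
--     """Extract frequency and interval from an RRULE string.
--
--     Returns:
--         Tuple of (frequency_name, interval). Defaults to ("DAILY", 1) on parse failure.
--     """
--     freq = "DAILY"
--     interval = 1
--     for part in rrule_str.split(";"):
--         if part.startswith("FREQ="):
--             freq = part.split("=", 1)[1]
--         elif part.startswith("INTERVAL="):
--             try:
--                 interval = int(part.split("=", 1)[1])
--             except ValueError: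
--                 interval = 1
--     return freq, interval
-- ===== SOURCE B (Python) =====
-- def parse_rrule_parts(rrule_str: str) -> tuple[str, int]:
--     """Extract frequency and interval from an RRULE string.
--
--     Scans the parts back-to-front and takes the first (i.e. last-written)
--     match for each key, instead of folding last-wins state forward.
--     """
--     parts = rrule_str.split(";")
--     freq = "DAILY"
--     for p in reversed(parts):
--         if p.startswith("FREQ="):
--             freq = p.split("=", 1)[1]
--             break
--     interval = 1
--     for p in reversed(parts):
--         if p.startswith("INTERVAL="):
--             try:
--                 interval = int(p.split("=", 1)[1])
--             except ValueError:
--                 interval = 1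
--             break
--     return freq, interval
-- ===== Notes on version B (the rewrite author's own statement) =====
-- stated objective: alternative
-- what changed: Replaces A's single forward fold carrying last-wins (freq, interval) state by two independent backward scans that each take the first matching part and stop, exploiting that last-wins forward equals first-match backward.
import Mathlib
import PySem

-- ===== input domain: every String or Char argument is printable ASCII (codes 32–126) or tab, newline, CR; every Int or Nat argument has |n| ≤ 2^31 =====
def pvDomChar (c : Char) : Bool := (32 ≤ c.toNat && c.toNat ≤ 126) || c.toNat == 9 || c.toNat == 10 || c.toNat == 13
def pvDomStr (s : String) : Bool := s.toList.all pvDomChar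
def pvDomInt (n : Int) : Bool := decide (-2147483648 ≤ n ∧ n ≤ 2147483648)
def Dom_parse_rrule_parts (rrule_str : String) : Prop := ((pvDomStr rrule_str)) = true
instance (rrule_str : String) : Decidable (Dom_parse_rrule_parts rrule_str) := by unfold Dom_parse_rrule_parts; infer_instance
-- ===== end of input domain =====

-- B replaces A's forward last-wins fold by two backward first-match scans (same values; objective: alternative decomposition).

-- ===== PORT A =====
-- part.split("=", 1)[1]; the [1] is only evaluated under a startswith "…=" guard, where the
-- split always has two pieces, so the .getD defaults are unreachable.
def pvEqTailA (part : String) : String :=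
  ((PySem.Str.splitMax? part "=" 1).getD []).getD 1 ""

def parse_rrule_parts (rrule_str : String) : String × Int :=
  ((PySem.Str.split? rrule_str ";").getD []).foldl
    (fun (st : String × Int) part =>
      if PySem.Str.startswith part "FREQ=" then
        (pvEqTailA part, st.2)
      else if PySem.Str.startswith part "INTERVAL=" then
        (st.1, match PySem.Int.ofStr? (pvEqTailA part) with
               | some n => n
               | none => 1)
      else st)
    ("DAILY", 1)

-- ===== PORT B =====
-- Source B's p.split("=", 1)[1] is the same expression as A's, so it reuses pvEqTailA.
def parse_rrule_parts_alt (rrule_str : String) : String × Int :=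
  let parts : List String := (PySem.Str.split? rrule_str ";").getD []
  let freq :=
    match parts.reverse.find? (fun p => PySem.Str.startswith p "FREQ=") with
    | some p => pvEqTailA p
    | none => "DAILY"
  let interval :=
    match parts.reverse.find? (fun p => PySem.Str.startswith p "INTERVAL=") with
    | some p =>
        (match PySem.Int.ofStr? (pvEqTailA p) with
         | some n => n
         | none => 1)
    | none => 1
  (freq, interval)

-- ===== PRECONDITION & SPEC =====
def Spec_parse_rrule_parts (rrule_str : String) (out : String × Int) : Prop := out = parse_rrule_parts_alt rrule_str
instance (rrule_str : String) (out : String × Int) : Decidable (Spec_parse_rrule_parts rrule_str out) := by unfold Spec_parse_rrule_parts; infer_instance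

-- ===== CLAIM (what is proved, stated in full; the proofs are below) =====
def Claim_equal_parse_rrule_parts : Prop := ∀ (rrule_str : String), Dom_parse_rrule_parts rrule_str → Spec_parse_rrule_parts rrule_str (parse_rrule_parts rrule_str)

-- ===== LEMMAS AND PROOFS =====

-- "FREQ=" and "INTERVAL=" cannot both be prefixes of the same part.
lemma pv_not_both (p : String)
    (hF : PySem.Str.startswith p "FREQ=" = true) :
    PySem.Str.startswith p "INTERVAL=" = false := by
  by_contra h
  rw [Bool.not_eq_false] at h
  simp only [PySem.Str.startswith_eq, PySem.Chars.startswith_iff] at hF h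
  rcases hF with ⟨tF, hFp⟩
  rcases h with ⟨tI, hIp⟩
  rw [← hIp] at hFp
  simp at hFp

-- A forward fold whose two updates ignore the previous state equals, componentwise,
-- the first match of a backward scan (with mutually exclusive predicates).
lemma pv_fold_eq_rev_find (predF predI : String → Bool)
    (extF : String → String) (extI : String → Int)
    (hx : ∀ p, predF p = true → predI p = false) :
    ∀ (l : List String) (f0 : String) (i0 : Int),
      l.foldl
        (fun (st : String × Int) part =>
          if predF part then (extF part, st.2)
          else if predI part then (st.1, extI part)
          else st)
        (f0, i0)
      = ((match l.reverse.find? predF with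
          | some p => extF p
          | none => f0),
         (match l.reverse.find? predI with
          | some p => extI p
          | none => i0)) := by
  intro l
  induction l with
  | nil => intro f0 i0; simp
  | cons p l ih =>
    intro f0 i0
    have happ : ∀ (q : String → Bool),
        (p :: l).reverse.find? q
          = ((l.reverse.find? q).or (if q p then some p else none)) := by
      intro q
      rw [List.reverse_cons, List.find?_append]
      cases h : l.reverse.find? q
      · cases hq : q p <;> simp [hq, Option.or]
      · simp [Option.or]
    rw [List.foldl_cons, happ predF, happ predI]
    by_cases hF : predF p = true
    · have hI := hx p hF
      simp only [hF, hI, if_true, Bool.false_eq_true, if_false]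
      rw [ih]
      cases l.reverse.find? predF <;> cases l.reverse.find? predI <;> simp [Option.or]
    · rw [Bool.not_eq_true] at hF
      by_cases hI : predI p = true
      · simp only [hF, hI, if_true, Bool.false_eq_true, if_false]
        rw [ih]
        cases l.reverse.find? predF <;> cases l.reverse.find? predI <;> simp [Option.or]
      · rw [Bool.not_eq_true] at hI
        simp only [hF, hI, Bool.false_eq_true, if_false]
        rw [ih]
        cases l.reverse.find? predF <;> cases l.reverse.find? predI <;> simp [Option.or]

-- ===== VERDICT (by name: the statement is the Claim_ definition above) =====
theorem parse_rrule_parts_spec : Claim_equal_parse_rrule_parts := by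
  intro rrule_str _
  unfold Spec_parse_rrule_parts parse_rrule_parts parse_rrule_parts_alt
  rw [pv_fold_eq_rev_find
        (fun p => PySem.Str.startswith p "FREQ=")
        (fun p => PySem.Str.startswith p "INTERVAL=")
        pvEqTailA
        (fun p => match PySem.Int.ofStr? (pvEqTailA p) with
                  | some n => n
                  | none => 1)
        (fun p => pv_not_both p)]
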